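-- pv_equiv track=rewrite | github.com/ModelTC/lightx2v | lightx2v/models/schedulers/mgcdr/datasets/vd2.py | find_best_interval
-- ===== SOURCE A (Python) =====
-- def find_best_interval(interval_list, target_interval):
--     """
--     在列表中找到包含目标区间的区间；如果没有，则找到相交部分最多的区间。
--     :param interval_list: List[Tuple[int, int]] 区间列表，元素为 (start, end)
--     :param target_interval: Tuple[int, int] 目标区间，(start, end)
--     :return: Tuple[int, int] 匹配的区间
--     """
--     best_interval = None
--     max_overlap = 0
--     target_start, target_end = target_interval
--     for interval in interval_list:
--         start, end = interval
--         # 检查是否完全包含目标区间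
--         if start <= target_start and end >= target_end:
--             return interval  # 完全包含，直接返回
--         # 计算相交部分的长度
--         overlap_start = max(start, target_start)
--         overlap_end = min(end, target_end)
--         overlap_length = max(0, overlap_end - overlap_start)
--         # 更新最大相交区间
--         if overlap_length > max_overlap:
--             max_overlap = overlap_length
--             best_interval = interval
--     return best_interval  # 如果没有完全包含的区间，返回最大相交区间
-- ===== SOURCE B (Python) =====
-- def find_best_interval(interval_list, target_interval):
--     ts, te = target_interval
--     # pass 1: first interval fully containing the target
--     for iv in interval_list:
--         if iv[0] <= ts and iv[1] >= te:
--             return iv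
--     # pass 2: score every interval, take the first one attaining the maximal
--     # positive overlap (list.index returns the first occurrence)
--     if not interval_list:
--         return None
--     overlaps = [min(e, te) - max(s, ts) for (s, e) in interval_list]
--     m = max(overlaps)
--     if m <= 0:
--         return None
--     return interval_list[overlaps.index(m)]
-- ===== Notes on version B (the rewrite author's own statement) =====
-- stated objective: alternative
-- what changed: A's single loop with a (best_interval, max_overlap) accumulator and strict-'>' update is replaced by two independent passes: a containment search, then score every interval, take the maximum and index the first interval attaining it.
import Mathlib
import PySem

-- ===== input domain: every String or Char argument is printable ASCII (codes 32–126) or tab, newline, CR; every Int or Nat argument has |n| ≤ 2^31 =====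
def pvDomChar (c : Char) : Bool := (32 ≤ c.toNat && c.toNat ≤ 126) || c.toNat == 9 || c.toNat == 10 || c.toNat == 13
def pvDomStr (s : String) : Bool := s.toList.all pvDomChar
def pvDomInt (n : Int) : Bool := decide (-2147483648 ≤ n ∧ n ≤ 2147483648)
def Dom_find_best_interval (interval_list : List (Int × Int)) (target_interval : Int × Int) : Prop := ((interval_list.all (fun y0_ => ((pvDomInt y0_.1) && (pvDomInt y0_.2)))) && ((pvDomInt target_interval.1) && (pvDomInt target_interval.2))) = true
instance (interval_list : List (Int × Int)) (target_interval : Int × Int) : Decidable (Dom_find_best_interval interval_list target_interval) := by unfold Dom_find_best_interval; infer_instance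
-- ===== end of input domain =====

-- B separates A's single accumulator loop into two independent passes: a containment search,
-- then score-all / max / first-index — an alternative decomposition of the same cost.


-- ===== PORT A =====
-- A's single loop: early return on containment, else track (best_interval, max_overlap) with strict '>'.
def fbiLoopA (ts te : Int) : List (Int × Int) → Option (Int × Int) → Int → Option (Int × Int)
  | [], best, _ => best
  | (s, e) :: rest, best, maxOv =>
    if s ≤ ts ∧ e ≥ te then some (s, e)
    else
      let ov := max 0 (min e te - max s ts)
      if ov > maxOv then fbiLoopA ts te rest (some (s, e)) ov
      else fbiLoopA ts te rest best maxOv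

def find_best_interval (interval_list : List (Int × Int)) (target_interval : Int × Int) : Option (Int × Int) :=
  fbiLoopA target_interval.1 target_interval.2 interval_list none 0

-- ===== PORT B =====
-- pass 1: first interval fully containing the target
def fbiContain (ts te : Int) : List (Int × Int) → Option (Int × Int)
  | [] => none
  | iv :: rest => if iv.1 ≤ ts ∧ iv.2 ≥ te then some iv else fbiContain ts te rest

def find_best_interval_alt (interval_list : List (Int × Int)) (target_interval : Int × Int) : Option (Int × Int) :=
  let ts := target_interval.1
  let te := target_interval.2
  match fbiContain ts te interval_list with
  | some iv => some iv
  | none =>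
    if interval_list = [] then none
    else
      let overlaps := interval_list.map (fun p => min p.2 te - max p.1 ts)
      match PySem.List.max? overlaps (fun y => y) with
      | none => none
      | some m =>
        if m ≤ 0 then none
        else
          match PySem.List.index? overlaps m with
          | none => none   -- unreachable: m is max of overlaps
          | some i => PySem.List.pyGet? interval_list (i : Int)

-- ===== PRECONDITION & SPEC =====
def Spec_find_best_interval (interval_list : List (Int × Int)) (target_interval : Int × Int) (out : Option (Int × Int)) : Prop := out = find_best_interval_alt interval_list target_interval
instance (interval_list : List (Int × Int)) (target_interval : Int × Int) (out : Option (Int × Int)) : Decidable (Spec_find_best_interval interval_list target_interval out) := by unfold Spec_find_best_interval; infer_instance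

-- ===== CLAIM (what is proved, stated in full; the proofs are below) =====
def Claim_equal_find_best_interval : Prop := ∀ (interval_list : List (Int × Int)) (target_interval : Int × Int), Dom_find_best_interval interval_list target_interval → Spec_find_best_interval interval_list target_interval (find_best_interval interval_list target_interval)

-- ===== LEMMAS AND PROOFS =====

-- raw (unclamped) overlap score used by B
def fbiOv (ts te : Int) (p : Int × Int) : Int := min p.2 te - max p.1 ts

-- max-seed shuffling for foldl max
theorem foldl_max_max (l : List Int) : ∀ a b, List.foldl max (max a b) l = max a (List.foldl max b l) := by
  induction l with
  | nil => intro a b; rfl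
  | cons c t ih =>
    intro a b
    simp only [List.foldl_cons]
    rw [max_assoc, ih]

-- if some element contains the target, A's loop returns the first such, whatever the accumulator
theorem loopA_of_contain (ts te : Int) :
    ∀ (il : List (Int × Int)) (b : Option (Int × Int)) (q : Int) (c : Int × Int),
      fbiContain ts te il = some c → fbiLoopA ts te il b q = some c := by
  intro il
  induction il with
  | nil => intro b q c h; simp [fbiContain] at h
  | cons p rest ih =>
    intro b q c h
    rcases p with ⟨s, e⟩
    by_cases hc : s ≤ ts ∧ e ≥ te
    · simp [fbiContain, hc] at h
      simp [fbiLoopA, hc, h]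
    · simp [fbiContain, hc] at h
      simp only [fbiLoopA, if_neg hc]
      split
      · exact ih _ _ _ h
      · exact ih _ _ _ h

-- characterization of A's loop when no element contains the target
theorem loopA_char (ts te : Int) :
    ∀ (il : List (Int × Int)) (b : Option (Int × Int)) (q : Int),
      fbiContain ts te il = none → 0 ≤ q →
      fbiLoopA ts te il b q =
        (if q < List.foldl max q (il.map (fbiOv ts te))
         then il.find? (fun p => fbiOv ts te p == List.foldl max q (il.map (fbiOv ts te)))
         else b) := by
  intro il
  induction il with
  | nil => intro b q _ _; simp [fbiLoopA]
  | cons p rest ih =>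
    intro b q hnc hq
    rcases p with ⟨s, e⟩
    have hc : ¬ (s ≤ ts ∧ e ≥ te) := by
      by_contra h; simp [fbiContain, h] at hnc
    have hrest : fbiContain ts te rest = none := by
      simp [fbiContain, hc] at hnc; exact hnc
    have hov : fbiOv ts te (s, e) = min e te - max s ts := rfl
    simp only [fbiLoopA, if_neg hc, List.map_cons, List.foldl_cons]
    by_cases hgt : max 0 (min e te - max s ts) > q
    · -- update branch; since 0 ≤ q < max 0 ov, the raw ov is positive and equals the clamp
      have hraw : q < min e te - max s ts := by omega
      have hclamp : max 0 (min e te - max s ts) = min e te - max s ts := by omega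
      rw [if_pos hgt, hclamp]
      rw [ih _ _ hrest (by omega)]
      have hseed : max q (fbiOv ts te (s, e)) = fbiOv ts te (s, e) := by
        simp only [hov]; omega
      rw [← hov, hseed]
      set M := List.foldl max (fbiOv ts te (s, e)) (rest.map (fbiOv ts te)) with hM
      have hle : fbiOv ts te (s, e) ≤ M := (PySem.List.le_foldl_max _ _).1
      have hqM : q < M := by omega
      rw [if_pos hqM]
      by_cases heq : fbiOv ts te (s, e) = M
      · rw [if_neg (by omega), List.find?_cons_of_pos (by simp only [beq_iff_eq]; exact heq)]
      · rw [if_pos (by omega), List.find?_cons_of_neg (by simp only [beq_iff_eq]; exact heq)]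
    · -- skip branch: ov ≤ q, so the head never matters
      have hle : min e te - max s ts ≤ q := by omega
      rw [if_neg hgt, ih _ _ hrest hq]
      have hseed : max q (fbiOv ts te (s, e)) = q := by simp only [hov]; omega
      rw [hseed]
      split
      · next hlt =>
        rw [List.find?_cons_of_neg (by simp only [beq_iff_eq, fbiOv]; omega)]
      · rfl

-- interval_list[overlaps.index(m)] is the first element scoring m (when m occurs)
theorem index_map_get (ts te m : Int) :
    ∀ (il : List (Int × Int)) (i : Nat),
      PySem.List.index? (il.map (fbiOv ts te)) m = some i →
      PySem.List.pyGet? il (i : Int) = il.find? (fun p => fbiOv ts te p == m) := by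
  intro il
  induction il with
  | nil => intro i h; simp [PySem.List.index?] at h
  | cons p rest ih =>
    intro i h
    by_cases he : fbiOv ts te p = m
    · rw [List.map_cons, he, PySem.List.index?_cons_self] at h
      cases h
      rw [List.find?_cons_of_pos (by simp only [beq_iff_eq]; exact he)]
      simp [PySem.List.pyGet?, PySem.List.pyIdx?]
    · rw [List.map_cons, PySem.List.index?_cons_of_ne _ he] at h
      cases hrest : PySem.List.index? (rest.map (fbiOv ts te)) m with
      | none => rw [hrest] at h; simp at h
      | some j =>
        rw [hrest] at h; simp at h
        subst h
        rw [List.find?_cons_of_neg (by simp only [beq_iff_eq]; exact he)]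
        rw [← ih _ hrest]
        rw [PySem.List.pyGet?_natCast, PySem.List.pyGet?_natCast]
        simp

-- ===== VERDICT (by name: the statement is the Claim_ definition above) =====
theorem find_best_interval_spec : Claim_equal_find_best_interval := by
  intro il ti _
  unfold Spec_find_best_interval find_best_interval find_best_interval_alt
  rcases ti with ⟨ts, te⟩
  simp only [show (fun q : Int × Int => min q.2 te - max q.1 ts) = fbiOv ts te from rfl]
  cases hcon : fbiContain ts te il with
  | some c => exact loopA_of_contain ts te il none 0 c hcon
  | none =>
    rw [loopA_char ts te il none 0 hcon le_rfl]
    cases il with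
    | nil => simp
    | cons p rest =>
      simp only [List.map_cons, List.foldl_cons, PySem.List.max?_id_cons,
        if_neg (List.cons_ne_nil p rest)]
      rw [foldl_max_max]
      set m := List.foldl max (fbiOv ts te p) (rest.map (fbiOv ts te)) with hm
      by_cases hpos : m ≤ 0
      · rw [if_neg (by omega), if_pos hpos]
      · rw [if_pos (by omega), if_neg hpos, show max (0 : Int) m = m from by omega]
        have hmm : PySem.List.max? (fbiOv ts te p :: rest.map (fbiOv ts te)) (fun y => y) = some m := by
          rw [PySem.List.max?_id_cons]
        have hmem : m ∈ fbiOv ts te p :: rest.map (fbiOv ts te) := PySem.List.max?_mem hmm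
        cases hidx : PySem.List.index? (fbiOv ts te p :: rest.map (fbiOv ts te)) m with
        | none =>
          exact absurd hmem ((PySem.List.index?_eq_none_iff _ _).mp hidx)
        | some i =>
          exact (index_map_get ts te m (p :: rest) i (by rw [List.map_cons]; exact hidx)).symm
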